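-- pv_equiv track=rewrite | github.com/flageval-baai/Carena-hard-auto | BenchBuilder(modified)/filter.py | group_conversations_by_cluster
-- ===== SOURCE A (Python) =====
-- from typing import List, Dict, Optional
--
-- def calculate_score(conversation: Dict) -> int:
--     """Calculate score based on criteria_v0.1"""
--     criteria = conversation.get('category_tag', {}).get('criteria_v0.1', {})
--     return sum(1 for value in criteria.values() if value)
--
-- def group_conversations_by_cluster(conversations: List[Dict], clusters: List) -> Dict[str, List[tuple]]:
--     """Group conversations by cluster with their scores and indices"""
--     cluster_to_conversations = {}
--
--     for i, (conv, cluster) in enumerate(zip(conversations, clusters)):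
--         cluster_str = str(cluster)
--         score = calculate_score(conv)
--
--         if cluster_str not in cluster_to_conversations:
--             cluster_to_conversations[cluster_str] = []
--
--         cluster_to_conversations[cluster_str].append((conv, score, i))
--
--     return cluster_to_conversations
-- ===== SOURCE B (Python) =====
-- from itertools import groupby
-- from typing import List, Dict
--
-- def calculate_score(conversation: Dict) -> int:
--     criteria = conversation.get('category_tag', {}).get('criteria_v0.1', {})
--     return sum(1 for value in criteria.values() if value)
--
-- def group_conversations_by_cluster(conversations: List[Dict], clusters: List) -> Dict[str, List[tuple]]:
--     """Two-pass grouping: label every row, list the distinct labels in first-seen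
--     order, then collect each label's rows with one comprehension per label."""
--     labels = [str(cluster) for _, cluster in zip(conversations, clusters)]
--     keys = list(dict.fromkeys(labels))
--     return {k: [(conv, calculate_score(conv), i)
--                 for i, (conv, lab) in enumerate(zip(conversations, labels))
--                 if lab == k]
--             for k in keys}
-- ===== Notes on version B (the rewrite author's own statement) =====
-- stated objective: alternative
-- what changed: Replaces A's single streaming pass that inserts/appends into a hash dict with a two-pass scheme: label every row via str(cluster), dedup the labels in first-seen order, then build each group with one collecting comprehension per distinct label.
import Mathlib
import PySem

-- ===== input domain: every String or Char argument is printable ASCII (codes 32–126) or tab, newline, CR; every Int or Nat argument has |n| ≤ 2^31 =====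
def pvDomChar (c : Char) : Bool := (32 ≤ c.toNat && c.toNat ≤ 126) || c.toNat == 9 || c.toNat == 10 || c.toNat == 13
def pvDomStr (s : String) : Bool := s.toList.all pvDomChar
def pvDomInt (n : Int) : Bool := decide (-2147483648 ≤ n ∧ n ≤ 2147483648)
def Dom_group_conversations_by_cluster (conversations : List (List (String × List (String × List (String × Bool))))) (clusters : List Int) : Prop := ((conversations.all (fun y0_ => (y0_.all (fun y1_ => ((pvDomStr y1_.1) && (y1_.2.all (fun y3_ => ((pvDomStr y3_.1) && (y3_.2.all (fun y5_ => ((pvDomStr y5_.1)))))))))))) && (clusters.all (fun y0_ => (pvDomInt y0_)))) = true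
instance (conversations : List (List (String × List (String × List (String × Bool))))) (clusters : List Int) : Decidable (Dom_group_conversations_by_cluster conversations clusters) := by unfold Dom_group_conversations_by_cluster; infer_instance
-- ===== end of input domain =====

-- B replaces A's streaming hash-insert grouping by a two-pass scheme (label rows, dedup the
-- labels, then one collecting pass per label); objective: alternative decomposition, not speed.

-- ===== PORT A =====
-- shared helper: Python's calculate_score (identical source in Source A and Source B)
def pvCalcScore (conv : List (String × List (String × List (String × Bool)))) : Int :=
  let criteria := ((conv.lookup "category_tag").getD []).lookup "criteria_v0.1" |>.getD []
  (criteria.map Prod.snd).foldl (fun acc v => if v then acc + 1 else acc) 0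

def group_conversations_by_cluster (conversations : List (List (String × List (String × List (String × Bool))))) (clusters : List Int) : List (String × List ((List (String × List (String × List (String × Bool)))) × Int × Int)) :=
  ((PySem.List.enumerate (conversations.zip clusters) 0).foldl
    (fun (d : PySem.Dict String (List ((List (String × List (String × List (String × Bool)))) × Int × Int))) p =>
      let cluster_str := PySem.Int.toStr p.2.2
      let score := pvCalcScore p.2.1
      PySem.Dict.modify (if d.contains cluster_str then d else d.insert cluster_str [])
        cluster_str [] (fun l => l ++ [(p.2.1, score, p.1)]))
    PySem.Dict.empty).items

-- ===== PORT B =====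
def group_conversations_by_cluster_alt (conversations : List (List (String × List (String × List (String × Bool))))) (clusters : List Int) : List (String × List ((List (String × List (String × List (String × Bool)))) × Int × Int)) :=
  let labels := (conversations.zip clusters).map (fun p => PySem.Int.toStr p.2)
  let keys := PySem.List.dedup labels
  keys.map (fun k =>
    (k, (PySem.List.enumerate (conversations.zip labels) 0).filterMap
          (fun q => if q.2.2 == k then some (q.2.1, pvCalcScore q.2.1, q.1) else none)))

-- ===== PRECONDITION & SPEC =====
def Spec_group_conversations_by_cluster (conversations : List (List (String × List (String × List (String × Bool))))) (clusters : List Int) (out : List (String × List ((List (String × List (String × List (String × Bool)))) × Int × Int))) : Prop := out = group_conversations_by_cluster_alt conversations clusters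
-- short names for the two deeply nested types (the Decidable instance's binders only)
abbrev PvConvs := List (List (String × List (String × List (String × Bool))))
abbrev PvOut := List (String × List ((List (String × List (String × List (String × Bool)))) × Int × Int))
instance (conversations : PvConvs) (clusters : List Int) (out : PvOut) : Decidable (Spec_group_conversations_by_cluster conversations clusters out) := by
  unfold Spec_group_conversations_by_cluster
  -- instance search needs stepping stones for the deeply nested type
  letI : DecidableEq (List (String × List (String × Bool))) := inferInstance
  letI : DecidableEq (List (String × List (String × List (String × Bool)))) := inferInstance
  letI : DecidableEq (List ((List (String × List (String × List (String × Bool)))) × Int × Int)) := inferInstance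
  infer_instance

-- ===== CLAIM (what is proved, stated in full; the proofs are below) =====
def Claim_equal_group_conversations_by_cluster : Prop := ∀ (conversations : List (List (String × List (String × List (String × Bool))))) (clusters : List Int), Dom_group_conversations_by_cluster conversations clusters → Spec_group_conversations_by_cluster conversations clusters (group_conversations_by_cluster conversations clusters)

-- ===== LEMMAS AND PROOFS =====

-- A's "if key missing insert []; then append" step IS one Dict.modify with default [].
theorem pv_step_eq {ν : Type} (d : PySem.Dict String (List ν)) (k : String) (t : ν) :
    PySem.Dict.modify (if d.contains k then d else d.insert k []) k [] (fun l => l ++ [t])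
      = d.modify k [] (fun l => l ++ [t]) := by
  by_cases h : d.contains k
  · simp [h]
  · have hc : d.contains k = false := by simpa using h
    simp [hc, PySem.Dict.modify, PySem.Dict.getD_insert_self, PySem.Dict.insert_insert_self,
      PySem.Dict.getD_of_not_contains]

theorem pv_enumerate_map {α β : Type} (f : α → β) (xs : List α) (s : Int) :
    PySem.List.enumerate (xs.map f) s = (PySem.List.enumerate xs s).map (fun p => (p.1, f p.2)) := by
  induction xs generalizing s with
  | nil => simp [PySem.List.enumerate_nil]
  | cons x xs ih => simp [PySem.List.enumerate_cons, ih]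

theorem pv_zip_self_map {α β γ : Type} (xs : List α) (ys : List β) (f : β → γ) :
    xs.zip ((xs.zip ys).map (fun p => f p.2)) = (xs.zip ys).map (fun p => (p.1, f p.2)) := by
  induction xs generalizing ys with
  | nil => simp
  | cons x xs ih =>
    cases ys with
    | nil => simp
    | cons y ys => simp [ih]

theorem pv_filterMap_ite {α β : Type} (l : List α) (q : α → Bool) (f : α → β) :
    l.filterMap (fun x => if q x then some (f x) else none) = (l.filter q).map f := by
  induction l with
  | nil => rfl
  | cons x xs ih => by_cases h : q x <;> simp [h, ih]

-- ===== VERDICT (by name: the statement is the Claim_ definition above) =====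
theorem group_conversations_by_cluster_spec : Claim_equal_group_conversations_by_cluster := by
  intro conversations clusters _
  unfold Spec_group_conversations_by_cluster
  unfold group_conversations_by_cluster group_conversations_by_cluster_alt
  set zs := conversations.zip clusters with hzs
  set E := PySem.List.enumerate zs 0 with hE
  -- rewrite A's step into a plain modify-fold over the labelled rows L
  have hstep :
      (fun (d : PySem.Dict String (List ((List (String × List (String × List (String × Bool)))) × Int × Int)))
           (p : Int × (List (String × List (String × List (String × Bool)))) × Int) =>
        PySem.Dict.modify (if d.contains (PySem.Int.toStr p.2.2) then d
            else d.insert (PySem.Int.toStr p.2.2) [])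
          (PySem.Int.toStr p.2.2) [] (fun l => l ++ [(p.2.1, pvCalcScore p.2.1, p.1)]))
      = (fun d p => PySem.Dict.modify d (PySem.Int.toStr p.2.2) []
            (fun l => l ++ [(p.2.1, pvCalcScore p.2.1, p.1)])) := by
    funext d p; exact pv_step_eq d _ _
  simp only [hstep]
  -- the modify-fold over E viewed as a fold over L := E.map m
  have hfold :
      E.foldl (fun d p => PySem.Dict.modify d (PySem.Int.toStr p.2.2) []
          (fun l => l ++ [(p.2.1, pvCalcScore p.2.1, p.1)])) PySem.Dict.empty
      = (E.map (fun p => (PySem.Int.toStr p.2.2, (p.2.1, pvCalcScore p.2.1, p.1)))).foldl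
          (fun d q => PySem.Dict.modify d q.1 [] (fun l => l ++ [q.2])) PySem.Dict.empty := by
    rw [List.foldl_map]
  rw [hfold]
  set L := E.map (fun p => (PySem.Int.toStr p.2.2, (p.2.1, pvCalcScore p.2.1, p.1))) with hL
  set D := L.foldl (fun d q => PySem.Dict.modify d q.1 [] (fun l => l ++ [q.2])) PySem.Dict.empty with hD
  have hnodup : D.keys.Nodup := by
    rw [hD]
    exact PySem.Dict.nodup_keys_foldl_modify_key L (·.1) [] (fun d q => (· ++ [q.2])) _
      PySem.Dict.nodup_keys_empty
  have hkeys : D.keys = PySem.Set.ofList (L.map (·.1)) := by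
    rw [hD]
    rw [PySem.Dict.keys_foldl_modify_key]
    simp [PySem.Dict.keys_empty, PySem.Set.update_nil_left]
  have hitems := PySem.Dict.items_eq_map_keys D hnodup []
  rw [hitems, hkeys]
  -- identify B's key list with A's
  have hlabels : L.map (·.1) = zs.map (fun p => PySem.Int.toStr p.2) := by
    rw [hL, List.map_map]
    conv_rhs => rw [← PySem.List.map_snd_enumerate zs (0 : Int), List.map_map]
    simp only [Function.comp_def]
    rw [← hE]
  rw [PySem.List.dedup_eq_ofList, hlabels]
  apply List.map_congr_left
  intro k _
  refine congrArg (Prod.mk k) ?_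
  -- A's group for key k
  have hA : D.getD k [] = (L.filter (fun q => q.1 == k)).map (·.2) := by
    rw [hD, PySem.Dict.getD_foldl_modify_append, PySem.Dict.getD_empty]
    simp
  rw [hA]
  -- B's group for key k
  have hz2 : conversations.zip (zs.map (fun p => PySem.Int.toStr p.2))
      = zs.map (fun p => (p.1, PySem.Int.toStr p.2)) := by
    rw [hzs]; exact pv_zip_self_map conversations clusters (fun c => PySem.Int.toStr c)
  rw [hz2, pv_enumerate_map, ← hE, List.filterMap_map]
  simp only [Function.comp_def]
  rw [pv_filterMap_ite E (fun p => PySem.Int.toStr p.2.2 == k)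
      (fun p => (p.2.1, pvCalcScore p.2.1, p.1)),
    hL, List.filter_map, List.map_map]
  simp only [Function.comp_def]
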